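-- pv_equiv track=rewrite | github.com/algo-gogo/algo_study | 정렬/다시풀기/실패율.py | fail
-- ===== SOURCE A (Python) =====
-- def fail(stages, index):
--     clear_count = 0
--     not_clear_count = 0
--     for i in stages:
--         if i == index:
--             not_clear_count += 1
--         if i >= index:
--             clear_count += 1
--     return not_clear_count, clear_count
-- ===== SOURCE B (Python) =====
-- def fail(stages, index):
--     counter = {}
--     for i in stages:
--         counter[i] = counter.get(i, 0) + 1
--     not_clear_count = counter.get(index, 0)
--     clear_count = sum(cnt for stage, cnt in counter.items() if stage >= index)
--     return not_clear_count, clear_count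
-- ===== Notes on version B (the rewrite author's own statement) =====
-- stated objective: alternative
-- what changed: Builds a stage-frequency histogram in one pass and derives both counts from it (a dict lookup for the stage count and a sum over distinct stage values), replacing A's per-element double test.
import Mathlib
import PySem

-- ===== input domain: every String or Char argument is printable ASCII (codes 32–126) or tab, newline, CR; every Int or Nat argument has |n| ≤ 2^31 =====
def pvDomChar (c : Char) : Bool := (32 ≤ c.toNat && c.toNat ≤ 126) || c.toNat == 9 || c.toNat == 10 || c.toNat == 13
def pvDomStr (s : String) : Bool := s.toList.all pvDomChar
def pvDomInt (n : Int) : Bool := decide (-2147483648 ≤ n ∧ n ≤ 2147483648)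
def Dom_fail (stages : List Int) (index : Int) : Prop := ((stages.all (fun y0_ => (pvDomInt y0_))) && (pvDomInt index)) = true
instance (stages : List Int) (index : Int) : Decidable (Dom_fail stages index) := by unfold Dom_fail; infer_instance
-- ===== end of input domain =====

-- B builds a stage-frequency histogram first and derives both counts from it; alternative decomposition, same asymptotics.

-- ===== PORT A =====
-- state is (clear_count, not_clear_count) in declaration order; returns (not_clear_count, clear_count)
def fail (stages : List Int) (index : Int) : Int × Int :=
  let s := stages.foldl (fun (p : Int × Int) i =>
      let nc := if i == index then p.2 + 1 else p.2
      let c  := if i ≥ index then p.1 + 1 else p.1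
      (c, nc)) (0, 0)
  (s.2, s.1)

-- ===== PORT B =====
def fail_alt (stages : List Int) (index : Int) : Int × Int :=
  let counter := stages.foldl (fun (d : PySem.Dict Int Int) i => d.insert i (d.getD i 0 + 1)) PySem.Dict.empty
  let not_clear_count := counter.getD index 0
  let clear_count := ((counter.items.filter (fun p => p.1 ≥ index)).map (·.2)).sum
  (not_clear_count, clear_count)

-- ===== PRECONDITION & SPEC =====
def Spec_fail (stages : List Int) (index : Int) (out : Int × Int) : Prop := out = fail_alt stages index
instance (stages : List Int) (index : Int) (out : Int × Int) : Decidable (Spec_fail stages index out) := by unfold Spec_fail; infer_instance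

-- ===== CLAIM (what is proved, stated in full; the proofs are below) =====
def Claim_equal_fail : Prop := ∀ (stages : List Int) (index : Int), Dom_fail stages index → Spec_fail stages index (fail stages index)

-- ===== LEMMAS AND PROOFS =====

-- A's loop, with the accumulator generalized (lambda in the simp-normal form of the port)
theorem fail_loop_char (stages : List Int) (index : Int) (c nc : Int) :
    stages.foldl (fun (p : Int × Int) i =>
      (if index ≤ i then p.1 + 1 else p.1, if i = index then p.2 + 1 else p.2)) (c, nc)
    = (c + (stages.countP (fun i => decide (index ≤ i)) : Int),
       nc + (stages.count index : Int)) := by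
  induction stages generalizing c nc with
  | nil => simp
  | cons x xs ih =>
    simp only [List.foldl_cons, List.countP_cons, List.count_cons, ih, Prod.mk.injEq]
    refine ⟨?_, ?_⟩
    · by_cases hge : index ≤ x <;> simp [hge] <;> push_cast <;> omega
    · by_cases hx : x = index <;> simp [hx] <;> push_cast <;> omega

theorem fail_eq (stages : List Int) (index : Int) :
    fail stages index = ((stages.count index : Int),
      (stages.countP (fun i => decide (index ≤ i)) : Int)) := by
  simp only [fail, ge_iff_le, beq_iff_eq]
  rw [fail_loop_char]
  simp

-- counting with a prefixed key: splitting one fresh key k off the key set (stated in Nat)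
theorem countP_cons_key (p : Int → Bool) (k : Int) (ks : List Int) (hk : k ∉ ks) (xs : List Int) :
    xs.countP (fun i => (decide (i = k) || decide (i ∈ ks)) && p i)
      = (if p k then xs.count k else 0) + xs.countP (fun i => decide (i ∈ ks) && p i) := by
  induction xs with
  | nil => simp
  | cons x xs ih =>
    simp only [List.countP_cons, List.count_cons]
    by_cases hxk : x = k
    · subst hxk
      have hm : x ∉ ks := hk
      by_cases hp : p x <;> simp [hm, hp, ih] <;> omega
    · by_cases hm : x ∈ ks <;> by_cases hp : p x <;> simp [hxk, hm, hp, ih] <;> omega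

-- summing the histogram over a nodup key set
theorem sum_counts_eq (p : Int → Bool) (xs : List Int) (ks : List Int) (hnd : ks.Nodup) :
    ((ks.filter p).map (fun k => (xs.count k : Int))).sum
      = (xs.countP (fun i => decide (i ∈ ks) && p i) : Int) := by
  induction ks with
  | nil => simp
  | cons k ks ih =>
    have hk : k ∉ ks := (List.nodup_cons.mp hnd).1
    have hnd' : ks.Nodup := (List.nodup_cons.mp hnd).2
    have hconv : (fun i => decide (i ∈ k :: ks) && p i)
        = (fun i => (decide (i = k) || decide (i ∈ ks)) && p i) := by
      funext i; simp
    rw [hconv, countP_cons_key p k ks hk xs]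
    by_cases hp : p k <;> simp [List.filter_cons, hp, ih hnd'] <;> push_cast <;> omega

theorem fail_alt_eq (stages : List Int) (index : Int) :
    fail_alt stages index = ((stages.count index : Int),
      (stages.countP (fun i => decide (index ≤ i)) : Int)) := by
  simp only [fail_alt, PySem.Dict.foldl_insert_getD_add_one_eq_counter,
    PySem.Dict.getD_counter, PySem.Dict.items_counter, List.filter_map, List.map_map,
    Function.comp_def, ge_iff_le, Prod.mk.injEq]
  refine ⟨by trivial, ?_⟩
  rw [sum_counts_eq (fun k => decide (index ≤ k)) stages _ (PySem.Set.nodup_ofList stages)]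
  congr 1
  apply List.countP_congr
  intro i hi
  simp [PySem.Set.mem_ofList, hi]

-- ===== VERDICT (by name: the statement is the Claim_ definition above) =====
theorem fail_spec : Claim_equal_fail := by
  intro stages index _
  unfold Spec_fail
  rw [fail_eq, fail_alt_eq]
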